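-- pv_equiv track=rewrite | github.com/Sebastian081296/betaversionlaufchallenge | modules/nutzer/Backup/lotterie.py | check_unique_names
-- ===== SOURCE A (Python) =====
-- def check_unique_names(teilnehmer):
--     names = [t.get("name","").strip() for t in teilnehmer]
--     lower_names = [n.lower() for n in names]
--     name_set = set()
--     for n in lower_names:
--         if n in name_set:
--             return False
--         name_set.add(n)
--     if any(n == "" for n in names):
--         return False
--     return True
-- ===== SOURCE B (Python) =====
-- def check_unique_names(teilnehmer):
--     lowered = sorted(t.get("name", "").strip().lower() for t in teilnehmer)
--     if lowered and lowered[0] == "":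
--         return False
--     return all(a != b for a, b in zip(lowered, lowered[1:]))
-- ===== Notes on version B (the rewrite author's own statement) =====
-- stated objective: alternative
-- what changed: Replaces the incremental hash-set membership loop plus a separate emptiness pass with a sort of the normalized names followed by a single adjacency scan: the first sorted element detects an empty name and equal neighbours detect case-insensitive duplicates.
import Mathlib
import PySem

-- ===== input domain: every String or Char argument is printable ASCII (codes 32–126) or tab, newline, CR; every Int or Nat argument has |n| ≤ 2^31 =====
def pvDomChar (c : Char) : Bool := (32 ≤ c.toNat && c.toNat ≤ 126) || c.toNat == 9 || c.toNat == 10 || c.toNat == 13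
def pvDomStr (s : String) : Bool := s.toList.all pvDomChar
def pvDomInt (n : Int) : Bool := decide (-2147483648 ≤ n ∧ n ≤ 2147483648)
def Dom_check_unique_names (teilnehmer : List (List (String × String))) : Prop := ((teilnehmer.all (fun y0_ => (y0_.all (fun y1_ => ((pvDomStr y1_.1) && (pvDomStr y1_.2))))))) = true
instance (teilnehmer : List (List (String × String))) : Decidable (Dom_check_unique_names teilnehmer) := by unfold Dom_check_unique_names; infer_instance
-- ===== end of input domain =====

-- B replaces A's hash-set membership loop (plus a second emptiness pass) by sorting the
-- normalized names once and scanning adjacent elements; return values are proved equal.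

-- ===== PORT A =====
-- the 'for n in lower_names' loop with the set accumulator, then the 'any(n == "")' pass
def pvALoop (names : List String) : List String → PySem.Set String → Bool
  | [], _ => !(names.any (fun n => n == ""))
  | n :: rest, s =>
      if PySem.Set.contains s n then false
      else pvALoop names rest (PySem.Set.add s n)

def check_unique_names (teilnehmer : List (List (String × String))) : Bool :=
  let names := teilnehmer.map (fun t => PySem.Str.strip (PySem.Dict.getD (PySem.Dict.mk t) "name" ""))
  let lower_names := names.map PySem.Str.lower
  pvALoop names lower_names PySem.Set.empty

-- ===== PORT B =====
def check_unique_names_alt (teilnehmer : List (List (String × String))) : Bool :=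
  let lowered := PySem.List.sorted
    (teilnehmer.map (fun t => PySem.Str.lower (PySem.Str.strip (PySem.Dict.getD (PySem.Dict.mk t) "name" ""))))
    (fun x => x) false
  match lowered with
  | [] => (lowered.zip (lowered.drop 1)).all (fun p => p.1 != p.2)
  | h :: _ =>
      if h == "" then false
      else (lowered.zip (lowered.drop 1)).all (fun p => p.1 != p.2)

-- ===== PRECONDITION & SPEC =====
def Spec_check_unique_names (teilnehmer : List (List (String × String))) (out : Bool) : Prop := out = check_unique_names_alt teilnehmer
instance (teilnehmer : List (List (String × String))) (out : Bool) : Decidable (Spec_check_unique_names teilnehmer out) := by unfold Spec_check_unique_names; infer_instance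

-- ===== CLAIM (what is proved, stated in full; the proofs are below) =====
def Claim_equal_check_unique_names : Prop := ∀ (teilnehmer : List (List (String × String))), Dom_check_unique_names teilnehmer → Spec_check_unique_names teilnehmer (check_unique_names teilnehmer)

-- ===== LEMMAS AND PROOFS =====

theorem str_le_empty (s : String) (h : s ≤ "") : s = "" := by
  rcases h.lt_or_eq with hlt | he
  · rw [String.lt_iff_toList_lt] at hlt
    exact absurd hlt (by simp)
  · exact he

theorem lower_eq_empty (s : String) : PySem.Str.lower s = "" ↔ s = "" := by
  constructor
  · intro h
    have := congrArg String.toList h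
    simp [PySem.Str.toList_lower, PySem.Chars.lower] at this
    exact this
  · rintro rfl; rfl

theorem pvALoop_eq (names : List String) : ∀ (rest : List String) (s : PySem.Set String),
    pvALoop names rest s
      = (decide (rest.Nodup ∧ ∀ x ∈ rest, x ∉ s)
          && !(names.any (fun n => n == "")))
  | [], s => by simp [pvALoop]
  | n :: rest, s => by
    rw [pvALoop]
    by_cases h : n ∈ s
    · rw [if_pos ((PySem.Set.contains_iff _ _).mpr h)]
      simp
      tauto
    · rw [if_neg (by simpa [PySem.Set.contains_iff] using h), pvALoop_eq names rest]
      congr 1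
      rw [decide_eq_decide]
      simp only [List.nodup_cons, PySem.Set.mem_add, not_or]
      constructor
      · rintro ⟨hnd, hall⟩
        refine ⟨⟨fun hm => (hall _ hm).2 rfl, hnd⟩, ?_⟩
        intro x hx
        rcases List.mem_cons.mp hx with rfl | hx'
        · exact h
        · exact (hall x hx').1
      · rintro ⟨⟨hnr, hnd⟩, hall⟩
        exact ⟨hnd, fun x hx => ⟨hall x (List.mem_cons_of_mem _ hx), fun he => hnr (he ▸ hx)⟩⟩

theorem adj_all_eq_nodup : ∀ (sl : List String), sl.Pairwise (· ≤ ·) →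
    ((sl.zip (sl.drop 1)).all (fun p => p.1 != p.2)) = decide sl.Nodup
  | [], _ => by simp
  | [a], _ => by simp
  | a :: b :: t, hp => by
    obtain ⟨h1, h2⟩ := List.pairwise_cons.mp hp
    have h3 := (List.pairwise_cons.mp h2).1
    have ih := adj_all_eq_nodup (b :: t) h2
    show ((a, b) :: ((b :: t).zip ((b :: t).drop 1))).all (fun p => p.1 != p.2) = _
    rw [List.all_cons, ih]
    have key : (a ≠ b ∧ (b :: t).Nodup) ↔ (a :: b :: t).Nodup := by
      rw [List.nodup_cons (a := a)]
      constructor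
      · rintro ⟨hne, hnd⟩
        refine ⟨?_, hnd⟩
        intro hmem
        rcases List.mem_cons.mp hmem with rfl | hat
        · exact hne rfl
        · exact hne (le_antisymm (h1 b (by simp)) (h3 a hat))
      · rintro ⟨hnm, hnd⟩
        exact ⟨fun hbe => hnm (hbe ▸ List.mem_cons_self), hnd⟩
    have kd : decide (a ≠ b ∧ (b :: t).Nodup) = decide ((a :: b :: t).Nodup) := by
      rw [decide_eq_decide]; exact key
    rw [← kd]
    by_cases hab : a = b
    · subst hab; simp
    · simp [hab]

-- the two programs agree for ANY list of stripped names
theorem pv_core (names : List String) :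
    pvALoop names (names.map PySem.Str.lower) PySem.Set.empty =
      (match PySem.List.sorted (names.map PySem.Str.lower) (fun x => x) false with
       | [] =>
          ((PySem.List.sorted (names.map PySem.Str.lower) (fun x => x) false).zip
            ((PySem.List.sorted (names.map PySem.Str.lower) (fun x => x) false).drop 1)).all
            (fun p => p.1 != p.2)
       | h :: _ =>
          if h == "" then false
          else ((PySem.List.sorted (names.map PySem.Str.lower) (fun x => x) false).zip
            ((PySem.List.sorted (names.map PySem.Str.lower) (fun x => x) false).drop 1)).all
            (fun p => p.1 != p.2)) := by
  set l := names.map PySem.Str.lower with hl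
  have hperm := PySem.List.sorted_perm l (fun x => x) false
  have hp : (PySem.List.sorted l (fun x => x) false).Pairwise (· ≤ ·) := by
    simpa using PySem.List.sorted_pairwise l (fun x => x)
  have hnd : (PySem.List.sorted l (fun x => x) false).Nodup ↔ l.Nodup := hperm.nodup_iff
  have hadj := adj_all_eq_nodup _ hp
  have hA := pvALoop_eq names l PySem.Set.empty
  have hempty : (names.any (fun n => n == "")) = decide ("" ∈ l) := by
    rw [Bool.eq_iff_iff]
    simp only [List.any_eq_true, beq_iff_eq, decide_eq_true_eq, hl, List.mem_map,
      lower_eq_empty]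
  have hAmem : ∀ x ∈ l, x ∉ PySem.Set.empty := by intro x _ hx; cases hx
  cases hsl : PySem.List.sorted l (fun x => x) false with
  | nil =>
    have hlnil : l = [] := (PySem.List.sorted_eq_nil_iff l (fun x => x) false).mp hsl
    have hnnil : names = [] := by
      cases names with
      | nil => rfl
      | cons a t => simp [hl] at hlnil
    subst hnnil
    rw [show l = [] from hlnil]
    simp [pvALoop]
  | cons h tl =>
    rw [hA, hempty]
    by_cases hh : h = ""
    · subst hh
      have hmem : "" ∈ l := hperm.mem_iff.mp (hsl ▸ List.mem_cons_self)
      simp [hmem]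
    · have hnm : "" ∉ l := by
        intro hmem
        exact hh (str_le_empty h (PySem.List.key_head_sorted_le l (fun x => x) hsl "" hmem))
      rw [hsl] at hadj
      simp only [hsl] at hnd
      simp only [List.drop_succ_cons, List.drop_zero] at hadj
      simp [hh, hnm]
      rw [hadj, decide_eq_decide]
      exact hnd.symm

-- ===== VERDICT (by name: the statement is the Claim_ definition above) =====
theorem check_unique_names_spec : Claim_equal_check_unique_names := by
  intro ts _
  show check_unique_names ts = check_unique_names_alt ts
  unfold check_unique_names check_unique_names_alt
  have hmap : ts.map (fun t => PySem.Str.lower (PySem.Str.strip (PySem.Dict.getD (PySem.Dict.mk t) "name" "")))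
      = (ts.map (fun t => PySem.Str.strip (PySem.Dict.getD (PySem.Dict.mk t) "name" ""))).map PySem.Str.lower := by
    simp [Function.comp]
  simp only [hmap]
  exact pv_core _
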